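-- pv_equiv track=rewrite | github.com/AndrewHartAR/rl-research | plot.py | params_to_title
-- ===== SOURCE A (Python) =====
-- def params_to_title(params):
--     # Create params_title with line breaks after every 5 parameters
--     param_items = []
--
--     for key, value in params.items():
--         param_items.append(f"{key}: {value}")
--
--     # Add line breaks after every 5 parameters
--     params_title = ""
--     for i, item in enumerate(param_items):
--         if i > 0 and i % 5 == 0:
--             params_title += "\n"
--         params_title += item
--         if i < len(param_items) - 1:
--             params_title += ", "
--
--     return params_title
-- ===== SOURCE B (Python) =====
-- def params_to_title(params):
--     items = [f"{key}: {value}" for key, value in params.items()]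
--     chunks = [", ".join(items[i:i+5]) for i in range(0, len(items), 5)]
--     return ", \n".join(chunks)
-- ===== Notes on version B (the rewrite author's own statement) =====
-- stated objective: simpler
-- what changed: Replaces the index-driven character accumulation (enumerate loop with i%5 and last-item tests) by a group-then-join pass: build the item strings, split them into chunks of 5, join within chunks with ', ' and between chunks with ', \n'.
import Mathlib
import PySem

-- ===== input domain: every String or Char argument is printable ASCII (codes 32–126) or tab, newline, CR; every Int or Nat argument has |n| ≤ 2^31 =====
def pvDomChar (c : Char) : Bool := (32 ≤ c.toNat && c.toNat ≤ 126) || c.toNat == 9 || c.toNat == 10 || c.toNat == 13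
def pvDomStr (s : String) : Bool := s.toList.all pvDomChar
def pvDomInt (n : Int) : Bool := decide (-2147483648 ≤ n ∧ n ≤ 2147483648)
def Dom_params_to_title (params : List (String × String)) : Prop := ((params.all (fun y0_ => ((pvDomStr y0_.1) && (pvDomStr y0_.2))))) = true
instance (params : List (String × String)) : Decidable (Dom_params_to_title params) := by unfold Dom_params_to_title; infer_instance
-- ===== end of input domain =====

-- B replaces A's index-driven character accumulation by a group-then-join pass (chunks of 5 via range); objective: simpler.


-- ===== PORT A =====
-- A's second loop: i is the running index, n the total number of items, acc the string built so far.
def pvLoopA (n : Nat) : List (List Char) → Nat → List Char → List Char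
  | [], _, acc => acc
  | item :: rest, i, acc =>
      let acc := if 0 < i ∧ i % 5 = 0 then acc ++ ['\n'] else acc
      let acc := acc ++ item
      let acc := if i < n - 1 then acc ++ [',', ' '] else acc
      pvLoopA n rest (i + 1) acc

-- A's first loop: param_items.append(f"{key}: {value}")
def pvItemsA (params : List (String × String)) : List (List Char) :=
  params.foldl (fun acc kv => acc ++ [kv.1.toList ++ [':', ' '] ++ kv.2.toList]) []

def params_to_title (params : List (String × String)) : String :=
  String.ofList (pvLoopA (pvItemsA params).length (pvItemsA params) 0 [])

-- ===== PORT B =====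
-- items = [f"{key}: {value}" for key, value in params.items()]
def pvItemsB (params : List (String × String)) : List (List Char) :=
  params.map (fun kv => kv.1.toList ++ [':', ' '] ++ kv.2.toList)

-- chunks = [", ".join(items[i:i+5]) for i in range(0, len(items), 5)]
def pvChunksB (items : List (List Char)) : List (List Char) :=
  (PySem.List.pyRange 0 items.length 5).map
    (fun i => PySem.Chars.join [',', ' '] (PySem.List.slice items (some i) (some (i + 5))))

def params_to_title_alt (params : List (String × String)) : String :=
  String.ofList (PySem.Chars.join [',', ' ', '\n'] (pvChunksB (pvItemsB params)))

-- ===== PRECONDITION & SPEC =====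
def Spec_params_to_title (params : List (String × String)) (out : String) : Prop := out = params_to_title_alt params
instance (params : List (String × String)) (out : String) : Decidable (Spec_params_to_title params out) := by unfold Spec_params_to_title; infer_instance

-- ===== CLAIM (what is proved, stated in full; the proofs are below) =====
def Claim_equal_params_to_title : Prop := ∀ (params : List (String × String)), Dom_params_to_title params → Spec_params_to_title params (params_to_title params)

-- ===== LEMMAS AND PROOFS =====

-- reference renderer: item, then ", " if more items follow, plus "\n" after every 5th separator; k is the global index
def pvR : List (List Char) → Nat → List Char
  | [], _ => []
  | [x], _ => x
  | x :: y :: rest, k =>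
      x ++ [',', ' '] ++ (if (k + 1) % 5 = 0 then ['\n'] else []) ++ pvR (y :: rest) (k + 1)

-- proof-side chunking: take 5 / drop 5 until empty
def pvChunk5 : List (List Char) → List (List (List Char))
  | [] => []
  | x :: xs => (x :: xs).take 5 :: pvChunk5 ((x :: xs).drop 5)
  termination_by xs => xs.length
  decreasing_by simp

lemma pvLoopA_spec (items : List (List Char)) (i : Nat) (acc : List Char) :
    pvLoopA (i + items.length) items i acc =
      acc ++ (if 0 < i ∧ i % 5 = 0 ∧ items ≠ [] then ['\n'] else []) ++ pvR items i := by
  induction items generalizing i acc with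
  | nil => simp [pvLoopA, pvR]
  | cons x rest ih =>
    rw [show i + (x :: rest).length = (i + 1) + rest.length by simp; omega]
    simp only [pvLoopA]
    rw [ih (i + 1)]
    cases rest with
    | nil =>
      have h1 : ¬ (i < i + 1 + 0 - 1) := by omega
      simp only [h1, List.length_nil]
      simp [pvR]
      split_ifs <;> simp_all
    | cons y rest' =>
      have h1 : i < i + 1 + (y :: rest').length - 1 := by simp; omega
      simp only [h1, if_pos, pvR]
      split_ifs <;> simp_all

lemma pvJoin_cons_of_ne (sep x : List Char) (ys : List (List Char)) (h : ys ≠ []) :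
    PySem.Chars.join sep (x :: ys) = x ++ sep ++ PySem.Chars.join sep ys := by
  cases ys with
  | nil => exact absurd rfl h
  | cons y rest => exact PySem.Chars.join_cons_cons sep x y rest

lemma pvChunk5_ne_nil (l : List (List Char)) (h : l ≠ []) : pvChunk5 l ≠ [] := by
  cases l with
  | nil => exact absurd rfl h
  | cons x xs => simp [pvChunk5]

-- one unfolding step of range(a, b, 5)
lemma pvRange5_cons (a b : Nat) (h : a < b) :
    PySem.List.pyRange (a : Int) (b : Int) 5 = (a : Int) :: PySem.List.pyRange ((a : Int) + 5) (b : Int) 5 := by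
  rw [PySem.List.pyRange_of_pos _ _ (by norm_num : (0:Int) < 5),
      PySem.List.pyRange_of_pos _ _ (by norm_num : (0:Int) < 5)]
  have hab : ((a:Int) < (b:Int)) := by exact_mod_cast h
  have hcount : (((b : Int) - (a : Int) + 5 - 1) / 5).toNat = (b - a + 4) / 5 := by
    rw [show ((b : Int) - (a : Int) + 5 - 1) = ((b - a + 4 : Nat) : Int) by push_cast; omega,
        show ((5:Int)) = ((5:Nat):Int) from rfl, ← Int.natCast_div, Int.toNat_natCast]
  by_cases h5 : (a:Int) + 5 < (b:Int)
  · have hcount2 : (((b:Int) - ((a:Int)+5) + 5 - 1) / 5).toNat = (b - a - 1) / 5 := by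
      rw [show ((b:Int) - ((a:Int)+5) + 5 - 1) = ((b - a - 1 : Nat) : Int) by omega,
          show ((5:Int)) = ((5:Nat):Int) from rfl, ← Int.natCast_div, Int.toNat_natCast]
    simp only [if_pos hab, if_pos h5, hcount, hcount2]
    rw [show (b - a + 4) / 5 = (b - a - 1) / 5 + 1 by omega, List.range_succ_eq_map]
    simp only [List.map_cons, List.map_map, Nat.cast_zero, mul_zero, add_zero]
    congr 1
    refine List.map_congr_left fun k _ => ?_
    simp only [Function.comp]
    push_cast
    ring
  · simp only [if_pos hab, if_neg h5, hcount]
    rw [show (b - a + 4) / 5 = 1 by omega]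
    simp

-- the pyRange/slice comprehension computes pvChunk5's chunks (joined)
lemma pvChunksB_eq (full : List (List Char)) (a : Nat) :
    (PySem.List.pyRange (a : Int) (full.length : Int) 5).map
        (fun i => PySem.Chars.join [',', ' '] (PySem.List.slice full (some i) (some (i + 5)))) =
      (pvChunk5 (full.drop a)).map (PySem.Chars.join [',', ' ']) := by
  induction hn : full.length - a using Nat.strong_induction_on generalizing a with
  | _ n ih =>
  by_cases h : a < full.length
  · rw [pvRange5_cons a full.length h, List.map_cons]
    obtain ⟨x, xs, hx⟩ : ∃ x xs, full.drop a = x :: xs := by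
      cases hd : full.drop a with
      | nil => exact absurd (List.drop_eq_nil_iff.mp hd) (by omega)
      | cons x xs => exact ⟨x, xs, rfl⟩
    rw [show ((a:Int) + 5) = ((a:Int) + ((5:Nat):Int)) from by norm_num,
        PySem.List.slice_natCast_add,
        show ((a:Int) + ((5:Nat):Int)) = (((a + 5 : Nat)):Int) from by push_cast; ring,
        ih (full.length - (a + 5)) (by omega) (a + 5) rfl,
        hx]
    rw [pvChunk5, List.map_cons, ← hx, List.drop_drop]
  · rw [PySem.List.pyRange_of_pos _ _ (by norm_num : (0:Int) < 5),
        if_neg (by exact_mod_cast h), List.range_zero, List.map_nil, List.map_nil,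
        List.drop_eq_nil_of_le (by omega)]
    simp [pvChunk5]

-- B's chunked join equals the reference renderer (at chunk-aligned indices)
lemma pvChunk_spec (items : List (List Char)) (k : Nat) (hk : k % 5 = 0) :
    PySem.Chars.join [',', ' ', '\n'] ((pvChunk5 items).map (PySem.Chars.join [',', ' '])) =
      pvR items k := by
  induction hlen : items.length using Nat.strong_induction_on generalizing items k with
  | _ n ih =>
  match items with
  | [] => simp [pvChunk5, pvR, PySem.Chars.join_nil]
  | [a] => simp [pvChunk5, pvR, PySem.Chars.join_singleton]
  | [a, b] =>
    have h1 : (k + 1) % 5 ≠ 0 := by omega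
    simp [pvChunk5, pvR, PySem.Chars.join_singleton, PySem.Chars.join_cons_cons, h1]
  | [a, b, c] =>
    have h1 : (k + 1) % 5 ≠ 0 := by omega
    have h2 : (k + 2) % 5 ≠ 0 := by omega
    simp [pvChunk5, pvR, PySem.Chars.join_singleton, PySem.Chars.join_cons_cons, h1, h2]
  | [a, b, c, d] =>
    have h1 : (k + 1) % 5 ≠ 0 := by omega
    have h2 : (k + 2) % 5 ≠ 0 := by omega
    have h3 : (k + 3) % 5 ≠ 0 := by omega
    simp [pvChunk5, pvR, PySem.Chars.join_singleton, PySem.Chars.join_cons_cons, h1, h2, h3]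
  | [a, b, c, d, e] =>
    have h1 : (k + 1) % 5 ≠ 0 := by omega
    have h2 : (k + 2) % 5 ≠ 0 := by omega
    have h3 : (k + 3) % 5 ≠ 0 := by omega
    have h4 : (k + 4) % 5 ≠ 0 := by omega
    simp [pvChunk5, pvR, PySem.Chars.join_singleton, PySem.Chars.join_cons_cons, h1, h2, h3, h4]
  | a :: b :: c :: d :: e :: f :: rest =>
    have h1 : (k + 1) % 5 ≠ 0 := by omega
    have h2 : (k + 2) % 5 ≠ 0 := by omega
    have h3 : (k + 3) % 5 ≠ 0 := by omega
    have h4 : (k + 4) % 5 ≠ 0 := by omega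
    have h5 : (k + 5) % 5 = 0 := by omega
    have hrec := ih (f :: rest).length (by simp_all; omega) (f :: rest) (k + 5) h5 rfl
    rw [show pvChunk5 (a :: b :: c :: d :: e :: f :: rest)
          = [a, b, c, d, e] :: pvChunk5 (f :: rest) from by rw [pvChunk5]; simp]
    rw [List.map_cons,
        pvJoin_cons_of_ne _ _ _ (by simpa using pvChunk5_ne_nil (f :: rest) (by simp)),
        hrec]
    simp [pvR, PySem.Chars.join_cons_cons, PySem.Chars.join_singleton, h1, h2, h3, h4, h5]

-- ===== VERDICT (by name: the statement is the Claim_ definition above) =====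
theorem params_to_title_spec : Claim_equal_params_to_title := by
  intro params _
  unfold Spec_params_to_title params_to_title params_to_title_alt pvChunksB
  have hitems : pvItemsA params = pvItemsB params := by
    unfold pvItemsA pvItemsB
    rw [PySem.List.foldl_append_singleton_eq_map]
    simp only [List.nil_append]
  have hB : (PySem.List.pyRange 0 ((pvItemsB params).length : Int) 5).map
      (fun i => PySem.Chars.join [',', ' '] (PySem.List.slice (pvItemsB params) (some i) (some (i + 5)))) =
      (pvChunk5 (pvItemsB params)).map (PySem.Chars.join [',', ' ']) := by
    have := pvChunksB_eq (pvItemsB params) 0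
    simpa using this
  have hA := pvLoopA_spec (pvItemsB params) 0 []
  simp only [Nat.zero_add] at hA
  rw [hitems, hA, hB, pvChunk_spec (pvItemsB params) 0 (by decide)]
  simp
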